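/- GENERATED by mk_final_copies.py from the proof of the farm's unit `inverse_mdct.1` (farm:inverse_mdct.1.2: Proof.lean) as the
   re-elaboration sweep compiled it — do not edit. -/
/-
  UNIT `inverse_mdct.1`: segment 1 of `inverse_mdct` (stb_vorbis_fixed.c:2657-2692; 0x109220 … 0x1092e6 → `loop1` 0x1093a2):
  the prologue (six pushes, `sub rsp, 88H`, the spills of the four arguments), `n2 n4 n8`, `save_point = f->temp_offset`
  (check 0x109264), the test of `f->alloc_buffer` (check 0x10927a; the `je` into the alloca arm is never taken: AR1), the
  call of setup_temp_malloc (0x109290; it SUCCEEDS: `temp_alloc_ok` from ADO and T3), `A = f->A[blocktype]` (check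
  0x1092b0), the L1 set-up. Two walks (entry → the call, `cut1` → `loop1`); the exit assertion `At2` is built by
  `exit_loop1` of Lemmas.lean.
-/
import Asan.CheckWalk
import Vorbis.Spec.MdctUse
import Vorbis.Spec.Units.inverse_mdct_1
import Vorbis.Spec.Worked.inverse_mdct_1_Lemmas

namespace Vorbis.Spec.inverse_mdct_1
end Vorbis.Spec.inverse_mdct_1

open X86 X86.User Asan Vorbis Vorbis.Spec

set_option maxRecDepth 4000
set_option maxHeartbeats 4000000

/-- Segment 1 of `inverse_mdct`: from the function's entry with its precondition to the head of loop L1 with `At2`. -/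
theorem Vorbis.Spec.Worked.inverse_mdct_1_ok : Vorbis.Spec.inverse_mdct_1.Statement := by
  intro Lay hLay μ hμ u₀ hcode hload4 hload8 h_stm others frames len A stored room ysz k c ue ret he hpre
  have he0 := he
  have hpre0 : inverse_mdct.Pre others frames len A stored room ysz k c ue := hpre
  v_entry he
  have hstm := h_stm others frames A
  have hsh := hpre0.shadow
  have hsp := hsh.rsp
  have hobj : ObjLive others frames (ue.reg .rdx).toNat := by
    have := hpre0.live _ hpre0.ob1
    rw [inverse_mdct.f_def] at this
    exact this
  have hado : ADO A others ue.mem (ue.reg .rdx).toNat := by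
    have := hpre0.ado
    rw [inverse_mdct.f_def] at this
    exact this
  have har := hado.ok
  -- where `*f` is: one arithmetic fact (off the text, inside the data space, off this function's stack)
  have hwhere := hobj.where_ hsh.inv hsh.offText (by omega)
  -- the two loads of the arena fields, named before the walk: `f->temp_offset = T` (0x109269), `f->alloc_buffer = B` (0x10927f);
  -- with `B ≠ 0` (AR1) the walk prunes the `je 0x1092eb` into the dead alloca arm
  have r132 : ue.mem.readLE (ue.reg .rdx + 132) 4 = A.T := by
    have := har.u32_temp
    rw [Mem.u32] at this
    rw [← this]
    exact readLE_field ue.mem (ue.reg .rdx) 132 4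
  have r112 : ue.mem.readLE (ue.reg .rdx + 112) 8 = A.B := by
    have := har.u64_buffer
    rw [Mem.u64] at this
    rw [← this]
    exact readLE_field ue.mem (ue.reg .rdx) 112 8
  have hB1 := har.AR1
  have hbounds := har.bounds
  -- FIRST WALK: the entry 0x109220 … the call of setup_temp_malloc at 0x109290 (lines 2657-2662)
  u_walk hcode [hμ.vendor] until [Vorbis.L.inverse_mdct.loop1] span [Vorbis.L.textLo, Vorbis.L.textHi] side (v_side)
  case check_109264 =>
    -- 0x109264, line 2661 `temp_alloc_save(f)`: load4 `f + 0x84`, inside `*f`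
    have hun : ShadowUntouched ue.mem s_109264.mem := by v_untouched
    exact hobj.accSmall hsh.inv hun _ 4 (by decide) (by u_omega) (by u_omega)
  case check_10927a =>
    -- 0x10927a, line 2662 `temp_alloc(f, …)`: load8 `f + 0x70`, inside `*f`
    have hun : ShadowUntouched ue.mem s_10927a.mem := by v_untouched
    exact hobj.accSmall hsh.inv hun _ 8 (by decide) (by u_omega) (by u_omega)
  case call_inv =>
    v_inv
  case pre_109290 =>
    -- 0x109290, line 2662: `ArenaPre` of setup_temp_malloc — the shadow clause at the lower stack pointer, `*f` live, `ArenaOK`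
    -- carried over the pushes and spills (stack stores only), the arena above the text
    have hun : ShadowUntouched ue.mem s_109290.mem := by v_untouched
    have hS : Mem.SameExcept [⟨(ue.reg .rsp).toNat - 368, (ue.reg .rsp).toNat⟩] ue.mem s_109290.mem := by
      u_same
    have hle : (s_109290.reg .rsp).toNat ≤ (ue.reg .rsp).toNat := by
      rw [w_rsp]
      u_omega
    have h8 : (s_109290.reg .rsp).toNat % 8 = 0 := by
      rw [w_rsp]
      u_omega
    have hlo : 0x700000 ≤ (s_109290.reg .rsp).toNat + 8 := by
      rw [w_rsp]
      u_omega
    refine ⟨hsh.callee hun hle h8 hlo, ?_, ?_, hpre0.arenaText⟩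
    · rw [w_rdi]
      exact hobj
    · rw [w_rdi]
      have hf : (ue.reg .rdx).toNat + Off.sizeof.stb_vorbis ≤ 2 ^ 64 := by
        simp only [voff]
        omega
      apply har.frame_obj hf
      simp only [vblock, voff]
      apply hS.eqOn
      intro x hx
      simp only [List.mem_cons, List.mem_nil_iff, or_false] at hx
      subst hx
      simp only []
      omega
  -- AFTER THE CALL (`cut1`, 0x109295, line 2662 `buf2 = …`): the returned state `s_109290r`; what `v_after_call` does, except
  -- that `w_same` keeps `s_109290.mem` as its source until the stack slots have been carried over it
  have w_eq := Vorbis.conv_code_eqOn w_code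
  have w_df := (show X86.User.abiInv _ from w_inv).1
  have w_mx := (show X86.User.abiInv _ from w_inv).2
  have w_sse := Vorbis.sseOK_of_abiInv w_inv
  simp only [X86.User.Spec.footprint, vspec, w_rsp_109290] at w_same
  -- the request `esi = 4 * n2 = 2 n` as a number; it FITS (`temp_alloc_ok`: ADO, T3), so the success branch of the post holds
  have hfacts := hpre0.isBlocksize.facts
  have hnn : inverse_mdct.n ue = arg32 ue .rsi := by
    rw [inverse_mdct.n_def, arg32_def]
  rw [hnn] at hfacts
  have hn31 : arg32 ue .rsi < 2 ^ 31 := by omega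
  have e1 := arg32_sar ue .rsi 1 hn31
  have hm : (s_109290.reg .rsi).toNat % 2 ^ 32 = 2 * arg32 ue .rsi := by
    rw [w_rsi_109290, toNat_ofBV32, BitVec.toNat_setWidth, UInt64.toNat_toBitVec, UInt64.toNat_mul, e1]
    have e4 : (4 : Word).toNat = 4 := rfl
    rw [e4]
    omega
  have ht3 : 2 * arg32 ue .rsi ≤ stb_vorbis.temp_memory_required ue.mem (ue.reg .rdx).toNat := by
    have := hpre0.t3
    rw [hnn, inverse_mdct.f_def] at this
    exact this
  have h8 : r8 (2 * arg32 ue .rsi) ≤ stb_vorbis.temp_memory_required ue.mem (ue.reg .rdx).toNat :=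
    r8_le_of_le ht3 hado.tmr8
  obtain ⟨hfit, htb, hne, hgd⟩ := temp_alloc_ok hado h8
  have hpost : (A.Fits ((s_109290.reg .rsi).toNat % 2 ^ 32) →
      (s_109290r.reg .rax).toNat = A.B + (A.T - (r8 ((s_109290.reg .rsi).toNat % 2 ^ 32) + 32)) ∧
      ArenaOK (A.pushTemp ((s_109290.reg .rsi).toNat % 2 ^ 32)) (A.newTempObj ((s_109290.reg .rsi).toNat % 2 ^ 32) :: others) s_109290r.mem
        (s_109290.reg .rdi).toNat ∧
      ShadowInv (A.newTempObj ((s_109290.reg .rsi).toNat % 2 ^ 32) :: others) frames ((s_109290.reg .rsp).toNat + 8) s_109290r.mem) ∧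
    (¬ A.Fits ((s_109290.reg .rsi).toNat % 2 ^ 32) →
      s_109290r.reg .rax = 0 ∧
      ArenaOK A others s_109290r.mem (s_109290.reg .rdi).toNat ∧
      ShadowUntouched s_109290.mem s_109290r.mem ∧
      Mem.SameExcept [⟨(s_109290.reg .rsp).toNat - 80, (s_109290.reg .rsp).toNat⟩] s_109290.mem s_109290r.mem) := w_post
  rw [hm, w_rdi_109290, w_rsp_109290] at hpost
  obtain ⟨hrax, harena', hshadow'⟩ := hpost.1 hfit
  clear hpost
  simp only [w_rdi_109290, hm] at w_same
  -- the callee's shadow window as numbers (`u_omega` does not unfold `shadowSpan`)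
  have hswlo : (shadowSpan (A.B + (A.T - (r8 (2 * arg32 ue Reg.rsi) + 32)))
        (A.B + (A.T - (r8 (2 * arg32 ue Reg.rsi) + 32)) + 2 * arg32 ue Reg.rsi)).lo =
        0xC00000 + (A.B + (A.T - (r8 (2 * arg32 ue Reg.rsi) + 32))) / 8 := rfl
  have hswhi : (shadowSpan (A.B + (A.T - (r8 (2 * arg32 ue Reg.rsi) + 32)))
        (A.B + (A.T - (r8 (2 * arg32 ue Reg.rsi) + 32)) + 2 * arg32 ue Reg.rsi)).hi =
        0xC00000 + (A.B + (A.T - (r8 (2 * arg32 ue Reg.rsi) + 32)) + 2 * arg32 ue Reg.rsi + 7) / 8 := rfl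
  -- the stack slots over the callee's footprint
  have hp0 : UInt64.ofNat (s_109290.mem.readLE (ue.reg .rsp) 8) = ret := by u_resolve
  have hs0 : UInt64.ofNat (s_109290r.mem.readLE (ue.reg .rsp) 8) = ret := by u_frame hp0
  have hp1 : UInt64.ofNat (s_109290.mem.readLE (ue.reg .rsp - 8) 8) = ue.reg .rbp := by u_resolve
  have hs1 : UInt64.ofNat (s_109290r.mem.readLE (ue.reg .rsp - 8) 8) = ue.reg .rbp := by u_frame hp1
  have hp2 : UInt64.ofNat (s_109290.mem.readLE (ue.reg .rsp - 16) 8) = ue.reg .r15 := by u_resolve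
  have hs2 : UInt64.ofNat (s_109290r.mem.readLE (ue.reg .rsp - 16) 8) = ue.reg .r15 := by u_frame hp2
  have hp3 : UInt64.ofNat (s_109290.mem.readLE (ue.reg .rsp - 24) 8) = ue.reg .r14 := by u_resolve
  have hs3 : UInt64.ofNat (s_109290r.mem.readLE (ue.reg .rsp - 24) 8) = ue.reg .r14 := by u_frame hp3
  have hp4 : UInt64.ofNat (s_109290.mem.readLE (ue.reg .rsp - 32) 8) = ue.reg .r13 := by u_resolve
  have hs4 : UInt64.ofNat (s_109290r.mem.readLE (ue.reg .rsp - 32) 8) = ue.reg .r13 := by u_frame hp4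
  have hp5 : UInt64.ofNat (s_109290.mem.readLE (ue.reg .rsp - 40) 8) = ue.reg .r12 := by u_resolve
  have hs5 : UInt64.ofNat (s_109290r.mem.readLE (ue.reg .rsp - 40) 8) = ue.reg .r12 := by u_frame hp5
  have hp6 : UInt64.ofNat (s_109290.mem.readLE (ue.reg .rsp - 48) 8) = ue.reg .rbx := by u_resolve
  have hs6 : UInt64.ofNat (s_109290r.mem.readLE (ue.reg .rsp - 48) 8) = ue.reg .rbx := by u_frame hp6
  have hpu : UInt64.ofNat (s_109290.mem.readLE (ue.reg .rsp - 64) 8) = ue.reg .rdi := by u_resolve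
  have hsu : UInt64.ofNat (s_109290r.mem.readLE (ue.reg .rsp - 64) 8) = ue.reg .rdi := by u_frame hpu
  have hpn : s_109290.mem.readLE (ue.reg .rsp - 76) 4 = (Word.part .w32 (ue.reg .rsi)).toNat := by
    u_resolve
    exact Nat.mod_eq_of_lt (BitVec.isLt _)
  have hsn : s_109290r.mem.readLE (ue.reg .rsp - 76) 4 = (Word.part .w32 (ue.reg .rsi)).toNat := by u_frame hpn
  have hpf : UInt64.ofNat (s_109290.mem.readLE (ue.reg .rsp - 128) 8) = ue.reg .rdx := by u_resolve
  have hsf : UInt64.ofNat (s_109290r.mem.readLE (ue.reg .rsp - 128) 8) = ue.reg .rdx := by u_frame hpf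
  have hpbt : s_109290.mem.readLE (ue.reg .rsp - 132) 4 = (Word.part .w32 (ue.reg .rcx)).toNat := by
    u_resolve
    exact Nat.mod_eq_of_lt (BitVec.isLt _)
  have hsbt : s_109290r.mem.readLE (ue.reg .rsp - 132) 4 = (Word.part .w32 (ue.reg .rcx)).toNat := by u_frame hpbt
  have hpn2 : s_109290.mem.readLE (ue.reg .rsp - 120) 4 = ((Word.part .w32 (ue.reg .rsi)).sshiftRight 1).toNat := by
    u_resolve
    exact Nat.mod_eq_of_lt (BitVec.isLt _)
  have hsn2 : s_109290r.mem.readLE (ue.reg .rsp - 120) 4 = ((Word.part .w32 (ue.reg .rsi)).sshiftRight 1).toNat := by u_frame hpn2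
  have hpn4 : s_109290.mem.readLE (ue.reg .rsp - 136) 4 = ((Word.part .w32 (ue.reg .rsi)).sshiftRight 2).toNat := by
    u_resolve
    exact Nat.mod_eq_of_lt (BitVec.isLt _)
  have hsn4 : s_109290r.mem.readLE (ue.reg .rsp - 136) 4 = ((Word.part .w32 (ue.reg .rsi)).sshiftRight 2).toNat := by u_frame hpn4
  have hpn8 : s_109290.mem.readLE (ue.reg .rsp - 148) 4 = ((Word.part .w32 (ue.reg .rsi)).sshiftRight 3).toNat := by
    u_resolve
    exact Nat.mod_eq_of_lt (BitVec.isLt _)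
  have hsn8 : s_109290r.mem.readLE (ue.reg .rsp - 148) 4 = ((Word.part .w32 (ue.reg .rsi)).sshiftRight 3).toNat := by u_frame hpn8
  have hpsv : s_109290.mem.readLE (ue.reg .rsp - 152) 4 = (BitVec.ofNat 32 A.T).toNat := by
    u_resolve
    exact Nat.mod_eq_of_lt (BitVec.isLt _)
  have hssv : s_109290r.mem.readLE (ue.reg .rsp - 152) 4 = (BitVec.ofNat 32 A.T).toNat := by u_frame hpsv
  clear hp0 hp1 hp2 hp3 hp4 hp5 hp6 hpu hpn hpf hpbt hpn2 hpn4 hpn8 hpsv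
  obtain ⟨z, w_rax⟩ : ∃ z, s_109290r.reg .rax = z := ⟨_, rfl⟩
  rw [w_rax] at hrax
  -- `bt` as a number (`movsxd rax, [rbp-0x7c]`): with `hb` the walk reads `f->A[bt]` through the two stack stores before it
  have hbtn : inverse_mdct.bt ue = arg32 ue .rcx := by
    rw [inverse_mdct.bt_def, arg32_def]
  have hbt : arg32 ue .rcx < 2 := by
    rw [← hbtn]
    exact hpre0.btLt
  have hb := arg32_sext ue .rcx (by omega)
  -- SECOND WALK: `cut1` 0x109295 … `loop1` 0x1093a2 (lines 2662-2692)
  u_walk hcode [hμ.vendor] until [Vorbis.L.inverse_mdct.loop1] span [Vorbis.L.textLo, Vorbis.L.textHi] side (v_side)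
  case check_1092b0 =>
    -- 0x1092b0, line 2665 `f->A[blocktype]`: inside `*f`
    have hun : ShadowUntouched s_109290r.mem s_1092b0.mem := by v_untouched
    generalize Word.ofBV (BitVec.signExtend 64 (Word.part Width.w32 (ue.reg Reg.rcx))) = b at *
    exact (hobj.cons _).accSmall hshadow' hun _ 8 (by decide) (by u_omega) (by u_omega)
  -- the exit: the head of loop L1 (`loop1`, 0x1093a2, line 2692 `while (e != e_stop)`)
  refine ReachVia.done ?_
  have hS0 : Mem.SameExcept [⟨(ue.reg .rsp).toNat - 368, (ue.reg .rsp).toNat⟩] ue.mem s_109290.mem := by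
    u_same
  have habi : abiInv s_1092e6 := by
    v_inv
  exact Vorbis.Spec.inverse_mdct_1.exit_loop1 hLay he0 hpre0 hS0 w_same hrax harena' hshadow' hs0 hs1 hs2 hs3 hs4 hs5 hs6
    hsu hsn hsf hsbt hsn2 hsn4 hsn8 hssv w_rip w_r15 w_r13 w_r12 w_rbx w_rbp w_rsp w_mem w_eq habi
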